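-- pv_equiv track=rewrite | github.com/AloysiaSong/AI_labormarket | src/analysis/compute_esco_skill_count.py | count_skills
-- ===== SOURCE A (Python) =====
-- def count_skills(text: str, skills: list):
--     """
--     返回 (total_count, unique_count)：
--       total_count   = 所有技能词命中次数之和
--       unique_count  = 命中的不重复技能词数
--     """
--     if not text:
--         return 0, 0
--     t = text.lower()
--     matched = set()
--     for skill in skills:
--         if skill in t:
--             matched.add(skill)
--     return len(matched), len(matched)  # 本实现 total=unique（每词计1次）
-- ===== SOURCE B (Python) =====
-- def count_skills(text: str, skills: list):
--     if not text:
--         return 0, 0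
--     t = text.lower()
--     uniq = set(skills)
--     subs = {t[i:i + k] for k in {len(s) for s in uniq} for i in range(len(t) - k + 1)}
--     matched = len(uniq & subs)
--     return matched, matched
-- ===== Notes on version B (the rewrite author's own statement) =====
-- stated objective: faster
-- what changed: A runs one substring search over the lowered text per skill ('skill in t' in a loop); B indexes the text once — it builds the set of all substrings of t whose lengths occur among the deduplicated skills — and counts the skills by a single set intersection, so the text is no longer rescanned per skill.
import Mathlib
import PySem

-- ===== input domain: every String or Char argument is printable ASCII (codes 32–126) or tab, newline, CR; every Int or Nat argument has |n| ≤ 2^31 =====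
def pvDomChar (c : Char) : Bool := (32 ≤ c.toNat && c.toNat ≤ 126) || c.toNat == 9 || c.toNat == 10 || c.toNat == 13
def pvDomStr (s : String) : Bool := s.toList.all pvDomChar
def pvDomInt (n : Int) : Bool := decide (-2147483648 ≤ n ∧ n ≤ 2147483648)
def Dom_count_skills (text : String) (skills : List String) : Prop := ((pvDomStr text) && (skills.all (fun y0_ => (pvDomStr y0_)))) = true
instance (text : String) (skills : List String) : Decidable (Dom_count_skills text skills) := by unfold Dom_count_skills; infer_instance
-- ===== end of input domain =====

-- B replaces A's skill-by-skill substring search with an index of the text built once: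
-- the set of all substrings of the lowered text whose lengths occur among the (deduplicated)
-- skills, intersected with the skill set (objective: alternative).
-- The Python tuple result (m, m) is ported as the list [m, m]; strings are handled as char lists.

-- ===== PORT A =====
def count_skills (text : String) (skills : List String) : List Int :=
  if text.toList = [] then [0, 0]
  else
    let t := PySem.Str.lower text
    let matched : PySem.Set String :=
      skills.foldl (fun m skill => if PySem.Str.isIn skill t then PySem.Set.add m skill else m)
        PySem.Set.empty
    [PySem.Set.len matched, PySem.Set.len matched]

-- ===== PORT B =====
def count_skills_alt (text : String) (skills : List String) : List Int :=
  if text.toList = [] then [0, 0]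
  else
    let t := PySem.Chars.lower text.toList
    let uniq : PySem.Set (List Char) := PySem.Set.ofList (skills.map String.toList)
    let lengths : PySem.Set Int := PySem.Set.ofList (uniq.map (fun cs => (cs.length : Int)))
    -- {t[i:i+k] for k in lengths for i in range(len(t) - k + 1)}
    let subs : PySem.Set (List Char) :=
      lengths.foldl
        (fun acc k =>
          (PySem.List.pyRange 0 ((t.length : Int) - k + 1)).foldl
            (fun acc2 i => PySem.Set.add acc2 (PySem.List.slice t (some i) (some (i + k)))) acc)
        PySem.Set.empty
    let matched : Int := PySem.Set.len (PySem.Set.inter uniq subs)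
    [matched, matched]

-- ===== PRECONDITION & SPEC =====
def Spec_count_skills (text : String) (skills : List String) (out : List Int) : Prop := out = count_skills_alt text skills
instance (text : String) (skills : List String) (out : List Int) : Decidable (Spec_count_skills text skills out) := by unfold Spec_count_skills; infer_instance

-- ===== CLAIM (what is proved, stated in full; the proofs are below) =====
def Claim_equal_count_skills : Prop := ∀ (text : String) (skills : List String), Dom_count_skills text skills → Spec_count_skills text skills (count_skills text skills)

-- ===== LEMMAS AND PROOFS =====

-- A's fold builds set(filter), with a general accumulator
lemma foldA_eq (p : String → Bool) (l : List String) (acc : PySem.Set String) :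
    l.foldl (fun m s => if p s then PySem.Set.add m s else m) acc
      = (l.filter p).foldl PySem.Set.add acc := by
  induction l generalizing acc with
  | nil => rfl
  | cons s l ih =>
    by_cases h : p s <;> simp [h, ih]

lemma len_ofList_filter (p : String → Bool) (l : List String) :
    (PySem.Set.ofList (l.filter p)).length = (PySem.List.dedup l).countP p := by
  rw [← PySem.List.dedup_eq_ofList, List.countP_eq_length_filter]
  apply List.Perm.length_eq
  rw [List.perm_ext_iff_of_nodup (PySem.List.nodup_dedup _)
    ((PySem.List.nodup_dedup l).filter p)]
  intro x
  simp [List.mem_filter]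

-- set comprehension over an injective image commutes with the map
lemma ofList_map_inj {α β : Type} [BEq α] [LawfulBEq α] [BEq β] [LawfulBEq β]
    (f : α → β) (hf : Function.Injective f) (xs : List α) :
    PySem.Set.ofList (xs.map f) = (PySem.Set.ofList xs).map f := by
  induction xs with
  | nil => rfl
  | cons x xs ih =>
    rw [List.map_cons, PySem.Set.ofList_cons, PySem.Set.ofList_cons, ih, List.map_cons]
    congr 1
    show ((PySem.Set.ofList xs).map f).filter (fun y => !(y == f x))
        = ((PySem.Set.ofList xs).filter (fun y => !(y == x))).map f
    rw [List.filter_map]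
    apply congrArg (List.map f)
    apply List.filter_congr
    intro a _
    simp [Function.comp, hf.eq_iff]

-- membership in the two-level fold building the substring set
lemma mem_subs_fold {β : Type} (L : List β) (g : β → List Int)
    (f : β → Int → List Char) (init : PySem.Set (List Char)) (y : List Char) :
    y ∈ L.foldl (fun acc k => (g k).foldl (fun acc2 i => PySem.Set.add acc2 (f k i)) acc) init
      ↔ y ∈ init ∨ ∃ k ∈ L, ∃ i ∈ g k, y = f k i := by
  induction L generalizing init with
  | nil => simp
  | cons k L ih =>
    rw [List.foldl_cons, ih, PySem.Set.mem_foldl_add]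
    constructor
    · rintro (((h | ⟨i, hi, h⟩) | ⟨k', hk', i, hi, h⟩))
      · exact Or.inl h
      · exact Or.inr ⟨k, by simp, i, hi, h⟩
      · exact Or.inr ⟨k', by simp [hk'], i, hi, h⟩
    · rintro (h | ⟨k', hk', i, hi, h⟩)
      · exact Or.inl (Or.inl h)
      · rcases List.mem_cons.mp hk' with rfl | hk'
        · exact Or.inl (Or.inr ⟨i, hi, h⟩)
        · exact Or.inr ⟨k', hk', i, hi, h⟩

-- a skill is in the substring index iff it occurs in the text
-- (its own length is among the indexed lengths)
lemma sub_index_iff (t : List Char) (s : List Char) (lengths : List Int)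
    (hlen : (s.length : Int) ∈ lengths) (hpos : ∀ k ∈ lengths, 0 ≤ k) :
    (∃ k ∈ lengths, ∃ i ∈ PySem.List.pyRange 0 ((t.length : Int) - k + 1),
        PySem.List.slice t (some i) (some (i + k)) = s)
      ↔ PySem.Chars.isIn s t = true := by
  constructor
  · rintro ⟨k, hk, i, hi, hsl⟩
    rw [PySem.List.mem_pyRange_one] at hi
    have hk0 := hpos k hk
    rw [← PySem.Chars.exists_prefix_drop_iff_isIn]
    refine ⟨i.toNat, ?_⟩
    rw [PySem.List.slice_toNat t hi.1 (by omega)] at hsl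
    rw [← hsl]
    exact (List.take_prefix _ _).trans (List.prefix_refl _)
  · intro hin
    obtain ⟨j, hj⟩ := (PySem.Chars.exists_prefix_drop_iff_isIn s t).mpr hin
    have hjle : j + s.length ≤ t.length ∨ s = [] := by
      by_cases hj' : j ≤ t.length
      · left
        have := hj.length_le
        simp [List.length_drop] at this
        omega
      · right
        have : t.drop j = [] := List.drop_eq_nil_of_le (by omega)
        exact List.prefix_nil.mp (this ▸ hj)
    rcases hjle with hle | rfl
    · refine ⟨(s.length : Int), hlen, (j : Int), ?_, ?_⟩
      · rw [PySem.List.mem_pyRange_one]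
        constructor
        · exact Int.natCast_nonneg j
        · omega
      · rw [PySem.List.slice_natCast_add]
        exact (List.prefix_iff_eq_take.mp hj).symm
    · refine ⟨0, by simpa using hlen, 0, ?_, ?_⟩
      · rw [PySem.List.mem_pyRange_one]
        constructor
        · exact le_refl 0
        · have : 0 ≤ (t.length : Int) := Int.natCast_nonneg _
          omega
      · simp [PySem.List.slice_toNat t (le_refl 0) (le_refl 0)]

theorem count_skills_spec_aux (text : String) (skills : List String) :
    count_skills text skills = count_skills_alt text skills := by
  unfold count_skills count_skills_alt
  by_cases hε : text.toList = []
  · simp [hε]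
  · simp only [hε, reduceIte]
    rw [foldA_eq]
    have hofl : ∀ (l : List String),
        l.foldl PySem.Set.add PySem.Set.empty = PySem.Set.ofList l := fun _ => rfl
    rw [hofl]
    set t := PySem.Chars.lower text.toList with ht
    set uniq : PySem.Set (List Char) := PySem.Set.ofList (skills.map String.toList) with huniq
    set lengths : PySem.Set Int := PySem.Set.ofList (uniq.map (fun cs => (cs.length : Int)))
      with hlengths
    set subs : PySem.Set (List Char) :=
      lengths.foldl
        (fun acc k =>
          (PySem.List.pyRange 0 ((t.length : Int) - k + 1)).foldl
            (fun acc2 i => PySem.Set.add acc2 (PySem.List.slice t (some i) (some (i + k)))) acc)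
        PySem.Set.empty with hsubs
    -- B's count: intersection is a filter over uniq
    have hinter : PySem.Set.inter uniq subs = uniq.filter (fun x => subs.contains x) := rfl
    -- port uniq to the string side
    have huniq' : uniq = (PySem.Set.ofList skills).map String.toList := by
      rw [huniq]
      exact ofList_map_inj String.toList
        (fun a b h => by simpa using congrArg String.ofList h) skills
    have hlenpos : ∀ k ∈ lengths, (0:Int) ≤ k := by
      intro k hk
      rw [hlengths] at hk
      have := (PySem.Set.mem_ofList _ _).mp hk
      obtain ⟨cs, _, rfl⟩ := List.mem_map.mp this
      exact Int.natCast_nonneg _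
    -- pointwise: membership in subs is exactly substring occurrence
    have hpoint : ∀ s : String, s.toList ∈ (skills.map String.toList) →
        (subs.contains s.toList) = PySem.Chars.isIn s.toList t := by
      intro s hs
      have hmem : s.toList ∈ uniq := (PySem.Set.mem_ofList _ _).mpr hs
      have hlmem : ((s.toList.length : Int)) ∈ lengths := by
        rw [hlengths]
        exact (PySem.Set.mem_ofList _ _).mpr (List.mem_map.mpr ⟨s.toList, hmem, rfl⟩)
      have hiff : s.toList ∈ subs ↔ PySem.Chars.isIn s.toList t = true := by
        rw [hsubs, mem_subs_fold, ← sub_index_iff t s.toList lengths hlmem hlenpos]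
        constructor
        · rintro (h | ⟨k, hk, i, hi, h⟩)
          · simp [PySem.Set.empty] at h
          · exact ⟨k, hk, i, hi, h.symm⟩
        · rintro ⟨k, hk, i, hi, h⟩
          exact Or.inr ⟨k, hk, i, hi, h.symm⟩
      cases h' : PySem.Chars.isIn s.toList t with
      | true => exact (PySem.Set.contains_iff _ _).mpr (hiff.mpr h')
      | false =>
        refine Bool.eq_false_iff.mpr (fun hc => ?_)
        have := hiff.mp ((PySem.Set.contains_iff _ _).mp hc)
        rw [h'] at this
        exact Bool.false_ne_true this
    -- both counts as countP over dedup skills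
    have hA : (PySem.Set.ofList (skills.filter (fun s => PySem.Str.isIn s (PySem.Str.lower text)))).length
        = (PySem.List.dedup skills).countP (fun s => PySem.Str.isIn s (PySem.Str.lower text)) :=
      len_ofList_filter _ skills
    have hB : (PySem.Set.inter uniq subs).length
        = (PySem.List.dedup skills).countP (fun s => subs.contains s.toList) := by
      rw [hinter, huniq', ← List.countP_eq_length_filter, List.countP_map,
        ← PySem.List.dedup_eq_ofList]
      rfl
    have hAB : (PySem.List.dedup skills).countP (fun s => PySem.Str.isIn s (PySem.Str.lower text))
        = (PySem.List.dedup skills).countP (fun s => subs.contains s.toList) := by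
      apply List.countP_congr
      intro s hsmem
      have hs : s.toList ∈ skills.map String.toList :=
        List.mem_map.mpr ⟨s, (PySem.List.mem_dedup _ _).mp hsmem, rfl⟩
      rw [hpoint s hs, PySem.Str.isIn_eq, PySem.Str.toList_lower, ht]
    simp only [PySem.Set.len, hA, hB, hAB]

-- ===== VERDICT (by name: the statement is the Claim_ definition above) =====
theorem count_skills_spec : Claim_equal_count_skills := by
  intro text skills _
  unfold Spec_count_skills
  exact count_skills_spec_aux text skills
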